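-- pv_equiv track=rewrite | github.com/pypi-data/pypi-mirror-401 | packages/solokit/solokit-0.3.0-py3-none-any.whl/solokit/session/briefing/formatter.py | shift_heading_levels
-- ===== SOURCE A (Python) =====
-- def shift_heading_levels(markdown_content: str, shift: int) -> str:
--     r"""Shift all markdown heading levels by a specified amount.
--
--     Args:
--         markdown_content: The markdown text to process
--         shift: Number of levels to shift (positive = deeper, e.g., H1 → H3 if shift=2)
--
--     Returns:
--         Modified markdown with shifted heading levels
--
--     Example:
--         shift_heading_levels("# Title\n## Section", 2)
--         Returns: "### Title\n#### Section"
--     """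
--     if not markdown_content or shift <= 0:
--         return markdown_content
--
--     lines = markdown_content.split("\n")
--     result = []
--
--     for line in lines:
--         # Check if line starts with heading marker
--         if line.startswith("#"):
--             # Count existing heading level
--             heading_level = 0
--             for char in line:
--                 if char == "#":
--                     heading_level += 1
--                 else:
--                     break
--
--             # Calculate new level (cap at 6 for markdown)
--             new_level = min(heading_level + shift, 6)
--
--             # Reconstruct line with new heading level
--             rest_of_line = line[heading_level:]
--             result.append("#" * new_level + rest_of_line)
--         else:
--             result.append(line)
--
--     return "\n".join(result)
-- ===== SOURCE B (Python) =====
-- import re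
--
-- def shift_heading_levels(markdown_content: str, shift: int) -> str:
--     """Shift all markdown heading levels by a specified amount."""
--     if not markdown_content or shift <= 0:
--         return markdown_content
--     return re.sub(
--         r"^#+",
--         lambda m: "#" * min(len(m.group()) + shift, 6),
--         markdown_content,
--         flags=re.MULTILINE,
--     )
-- ===== Notes on version B (the rewrite author's own statement) =====
-- stated objective: idiomatic
-- what changed: Replaced the split-lines / per-line loop / char-by-char '#'-counting with a single multiline-regex substitution (re.sub r'^#+' with a capped-replacement lambda) over the whole string.
import Mathlib
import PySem

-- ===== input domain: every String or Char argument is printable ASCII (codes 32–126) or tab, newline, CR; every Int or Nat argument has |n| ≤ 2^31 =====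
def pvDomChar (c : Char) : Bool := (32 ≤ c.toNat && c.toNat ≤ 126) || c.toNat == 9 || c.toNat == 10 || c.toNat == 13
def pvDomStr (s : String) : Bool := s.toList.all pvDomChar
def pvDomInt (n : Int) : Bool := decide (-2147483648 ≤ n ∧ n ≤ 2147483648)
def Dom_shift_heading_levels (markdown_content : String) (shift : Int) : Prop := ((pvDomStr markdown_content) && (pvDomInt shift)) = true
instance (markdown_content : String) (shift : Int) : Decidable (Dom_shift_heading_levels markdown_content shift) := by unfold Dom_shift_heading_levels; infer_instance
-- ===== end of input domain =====

-- B replaces A's split-lines/loop/char-count with a single regex-style substitution pass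
-- over the whole string (re.sub r'^#+' with MULTILINE); objective: more idiomatic, same cost.


-- ===== PORT A =====
-- A's inner `for char in line: if '#' … else break` counting loop, literally.
def pvCountLevel : List Char → Nat
  | [] => 0
  | c :: cs => if c == '#' then pvCountLevel cs + 1 else 0

-- A's per-line body (the body of `for line in lines`).
def pvShiftLine (shift : Int) (line : List Char) : List Char :=
  if PySem.Chars.startswith line ['#'] then
    let heading_level := pvCountLevel line
    let new_level := min ((heading_level : Int) + shift) 6
    let rest_of_line := line.drop heading_level   -- line[heading_level:], index in range
    List.replicate new_level.toNat '#' ++ rest_of_line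
  else line

def shift_heading_levels (markdown_content : String) (shift : Int) : String :=
  if markdown_content = "" ∨ shift ≤ 0 then markdown_content
  else
    let lines := PySem.Chars.splitOn markdown_content.toList ['\n']
    String.mk (PySem.Chars.join ['\n'] (List.map (pvShiftLine shift) lines))

-- ===== PORT B =====
-- Hand port of re.sub(r'^#+', repl, s, flags=MULTILINE): at each line start take the
-- leading '#'-run (possibly empty → no match → no replacement), emit the capped run,
-- copy the rest of the line, continue after the newline.  Exact for this pattern,
-- since MULTILINE '^' matches exactly at position 0 and after each '\n'.
def pvSubGo (shift : Int) (cs : List Char) : List Char :=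
  let run := cs.takeWhile (· == '#')
  let afterRun := cs.dropWhile (· == '#')
  let repl := if run.isEmpty then []
              else List.replicate (min ((run.length : Int) + shift) 6).toNat '#'
  let body := afterRun.takeWhile (· != '\n')
  match h : afterRun.dropWhile (· != '\n') with
  | [] => repl ++ body
  | _ :: rs => repl ++ body ++ '\n' :: pvSubGo shift rs
termination_by cs.length
decreasing_by
  have h1 : (cs.dropWhile (· == '#')).length ≤ cs.length := cs.length_dropWhile_le _
  have h2 : ((cs.dropWhile (· == '#')).dropWhile (· != '\n')).length ≤ (cs.dropWhile (· == '#')).length :=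
    List.length_dropWhile_le _ _
  rw [h] at h2
  simp at h2
  omega

def shift_heading_levels_alt (markdown_content : String) (shift : Int) : String :=
  if markdown_content = "" ∨ shift ≤ 0 then markdown_content
  else String.mk (pvSubGo shift markdown_content.toList)

-- ===== PRECONDITION & SPEC =====
def Spec_shift_heading_levels (markdown_content : String) (shift : Int) (out : String) : Prop := out = shift_heading_levels_alt markdown_content shift
instance (markdown_content : String) (shift : Int) (out : String) : Decidable (Spec_shift_heading_levels markdown_content shift out) := by unfold Spec_shift_heading_levels; infer_instance

-- ===== CLAIM (what is proved, stated in full; the proofs are below) =====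
def Claim_equal_shift_heading_levels : Prop := ∀ (markdown_content : String) (shift : Int), Dom_shift_heading_levels markdown_content shift → Spec_shift_heading_levels markdown_content shift (shift_heading_levels markdown_content shift)

-- ===== LEMMAS AND PROOFS =====

-- Structural split-on-'\n', the common yardstick both ports are reduced to.
def splitNl : List Char → List (List Char)
  | [] => [[]]
  | c :: rest => if c = '\n' then [] :: splitNl rest else mapHead (fun x => c :: x) (splitNl rest)
where
  mapHead (f : List Char → List Char) : List (List Char) → List (List Char)
    | [] => []
    | x :: xs => f x :: xs

theorem splitNl_ne_nil (l : List Char) : splitNl l ≠ [] := by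
  cases l with
  | nil => simp [splitNl]
  | cons c rest =>
    simp only [splitNl]
    split
    · simp
    · cases h : splitNl rest with
      | nil => exact absurd h (splitNl_ne_nil rest)
      | cons x xs => simp [splitNl.mapHead]

theorem splitNl_head (l : List Char) :
    (splitNl l).head? = some (l.takeWhile (· != '\n')) := by
  induction l with
  | nil => simp [splitNl]
  | cons c rest ih =>
    by_cases hc : c = '\n'
    · simp [splitNl, hc]
    · cases h : splitNl rest with
      | nil => exact absurd h (splitNl_ne_nil rest)
      | cons x xs =>
        rw [h] at ih
        simp only [List.head?_cons, Option.some.injEq] at ih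
        simp [splitNl, hc, h, splitNl.mapHead, List.takeWhile_cons, ih]

theorem splitNl_eq_cons (l : List Char) :
    splitNl l = l.takeWhile (· != '\n') :: (splitNl l).tail := by
  cases h : splitNl l with
  | nil => exact absurd h (splitNl_ne_nil l)
  | cons x xs =>
    have := splitNl_head l
    rw [h] at this
    simp only [List.head?_cons, Option.some.injEq] at this
    simp [← this]

theorem splitNl_tail_nil (l : List Char) (h : l.dropWhile (· != '\n') = []) :
    (splitNl l).tail = [] := by
  induction l with
  | nil => simp [splitNl]
  | cons c rest ih =>
    by_cases hc : c = '\n'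
    · subst hc
      simp at h
    · have hcn : (c != '\n') = true := by simpa using hc
      rw [List.dropWhile_cons, if_pos hcn] at h
      cases hs : splitNl rest with
      | nil => exact absurd hs (splitNl_ne_nil rest)
      | cons x xs =>
        have := ih h
        rw [hs] at this
        simp only [List.tail_cons] at this
        simp [splitNl, hc, hs, splitNl.mapHead, this]

theorem splitNl_tail_cons (l : List Char) (d : Char) (r : List Char)
    (h : l.dropWhile (· != '\n') = d :: r) :
    (splitNl l).tail = splitNl r := by
  induction l with
  | nil => simp at h
  | cons c rest ih =>
    by_cases hc : c = '\n'
    · subst hc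
      rw [List.dropWhile_cons, if_neg (by simp)] at h
      cases h
      simp [splitNl]
    · have hcn : (c != '\n') = true := by simpa using hc
      rw [List.dropWhile_cons, if_pos hcn] at h
      cases hs : splitNl rest with
      | nil => exact absurd hs (splitNl_ne_nil rest)
      | cons x xs =>
        have := ih h
        rw [hs] at this
        simp only [List.tail_cons] at this
        simp [splitNl, hc, hs, splitNl.mapHead, this]

theorem dropWhile_head_false {p : Char → Bool} {l : List Char} {c : Char} {r : List Char}
    (h : l.dropWhile p = c :: r) : p c = false := by
  induction l with
  | nil => simp at h
  | cons a l ih =>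
    by_cases ha : p a
    · rw [List.dropWhile_cons_of_pos ha] at h
      exact ih h
    · rw [List.dropWhile_cons_of_neg ha] at h
      cases h
      simpa using ha

theorem tw_ne_nl (cs : List Char) :
    cs.takeWhile (· != '\n') =
      cs.takeWhile (· == '#') ++ (cs.dropWhile (· == '#')).takeWhile (· != '\n') := by
  induction cs with
  | nil => simp
  | cons c cs ih =>
    by_cases hc : c = '#'
    · subst hc
      simpa using ih
    · simp [List.takeWhile_cons, hc]

theorem dw_ne_nl (cs : List Char) :
    cs.dropWhile (· != '\n') = (cs.dropWhile (· == '#')).dropWhile (· != '\n') := by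
  induction cs with
  | nil => simp
  | cons c cs ih =>
    by_cases hc : c = '#'
    · subst hc
      simpa using ih
    · simp [List.dropWhile_cons, hc]

theorem countLevel_eq (l : List Char) :
    pvCountLevel l = (l.takeWhile (· == '#')).length := by
  induction l with
  | nil => simp [pvCountLevel]
  | cons c cs ih =>
    by_cases hc : c = '#'
    · simp [pvCountLevel, hc, ih]
    · simp [pvCountLevel, hc]

-- pvShiftLine applied to the first line equals "replacement ++ rest of the line".
theorem shiftLine_decomp (shift : Int) (cs : List Char) :
    pvShiftLine shift (cs.takeWhile (· != '\n')) =
      (if (cs.takeWhile (· == '#')).isEmpty then []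
       else List.replicate (min (((cs.takeWhile (· == '#')).length : Int) + shift) 6).toNat '#') ++
      (cs.dropWhile (· == '#')).takeWhile (· != '\n') := by
  have hsplit := tw_ne_nl cs
  set run := cs.takeWhile (· == '#') with hrun
  set body := (cs.dropWhile (· == '#')).takeWhile (· != '\n') with hbody
  -- every element of run is '#'; the head of body is not '#'
  have hbodytw : body.takeWhile (· == '#') = [] := by
    cases hb : body with
    | nil => simp
    | cons b bs =>
      have : (cs.dropWhile (· == '#')).takeWhile (· != '\n') = b :: bs := by rw [← hbody, hb]
      cases hd : cs.dropWhile (· == '#') with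
      | nil => rw [hd] at this; simp at this
      | cons d ds =>
        have hdb : d = b := by
          rw [hd, List.takeWhile_cons] at this
          by_cases hdn : (d != '\n') = true
          · rw [if_pos hdn] at this
            exact (List.cons_eq_cons.mp this).1
          · rw [if_neg hdn] at this
            simp at this
        have hdh := dropWhile_head_false hd
        subst hdb
        simp [List.takeWhile_cons, hdh]
  cases hr : run with
  | nil =>
    -- no leading '#': pvShiftLine leaves the line unchanged
    rw [hr] at hsplit
    simp only [List.nil_append] at hsplit
    rw [hsplit]
    unfold pvShiftLine
    rw [if_neg]
    · simp [hr]
    · intro hsw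
      obtain hpre := (PySem.Chars.startswith_iff _ _).mp hsw
      cases hb : body with
      | nil => rw [hb] at hpre; simp [List.prefix_nil] at hpre
      | cons b bs =>
        rw [hb] at hpre
        rw [List.prefix_cons_iff] at hpre
        rcases hpre with h | ⟨t, ht, _⟩
        · simp at h
        · have hbh : b = '#' := by cases ht; rfl
          rw [hb] at hbodytw
          rw [hbh] at hbodytw
          simp at hbodytw
  | cons a as =>
    -- leading '#'-run of length ≥ 1
    have hruns : ∀ x ∈ run, (x == '#') = true := by
      intro x hx
      rw [hrun] at hx
      exact List.mem_takeWhile_imp (p := fun y => y == '#') (l := cs) hx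
    have htw : (run ++ body).takeWhile (· == '#') = run := by
      rw [List.takeWhile_append]
      split
      · rw [List.takeWhile_eq_self_iff.mpr hruns] at *
        rw [hbodytw, List.append_nil]
      · rename_i hlen
        exact absurd (by rw [List.takeWhile_eq_self_iff.mpr hruns]) hlen
    rw [hsplit]
    unfold pvShiftLine
    rw [if_pos]
    · simp only [countLevel_eq, htw]
      rw [List.drop_left]
      rw [hr]
      simp
    · apply (PySem.Chars.startswith_iff _ _).mpr
      have ha : a = '#' := by
        have := hruns a (by rw [hr]; exact List.mem_cons_self ..)
        simpa using this
      rw [hr, ha]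
      exact ⟨as ++ body, by simp⟩

theorem splitOn_go_spec (fuel : Nat) : ∀ (l cur : List Char) (acc : List (List Char)),
    l.length < fuel →
    PySem.Chars.splitOn.go ['\n'] fuel l cur acc =
      acc.reverse ++ splitNl.mapHead (cur.reverse ++ ·) (splitNl l) := by
  induction fuel with
  | zero => intro l cur acc h; omega
  | succ fuel ih =>
    intro l cur acc h
    cases l with
    | nil =>
      have hgo : PySem.Chars.splitOn.go ['\n'] (fuel + 1) [] cur acc =
          (cur.reverse :: acc).reverse := rfl
      rw [hgo]
      simp [splitNl, splitNl.mapHead]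
    | cons c rest =>
      have hgo : PySem.Chars.splitOn.go ['\n'] (fuel + 1) (c :: rest) cur acc =
          if List.isPrefixOf ['\n'] (c :: rest) = true then
            PySem.Chars.splitOn.go ['\n'] fuel (List.drop (['\n'] : List Char).length (c :: rest))
              [] (cur.reverse :: acc)
          else PySem.Chars.splitOn.go ['\n'] fuel rest (c :: cur) acc := rfl
      rw [hgo]
      by_cases hc : c = '\n'
      · subst hc
        rw [if_pos (by simp [List.isPrefixOf])]
        have hdrop : List.drop (['\n'] : List Char).length ('\n' :: rest) = rest := by simp
        rw [hdrop, ih rest [] (cur.reverse :: acc) (by simp at h; omega)]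
        cases hs : splitNl rest with
        | nil => exact absurd hs (splitNl_ne_nil rest)
        | cons x xs => simp [splitNl, splitNl.mapHead, hs]
      · rw [if_neg (by simp [List.isPrefixOf]; exact fun hh => hc hh.symm)]
        rw [ih rest (c :: cur) acc (by simp at h; omega)]
        cases hs : splitNl rest with
        | nil => exact absurd hs (splitNl_ne_nil rest)
        | cons x xs => simp [splitNl, splitNl.mapHead, hs, hc]

theorem splitOn_eq_splitNl (l : List Char) :
    PySem.Chars.splitOn l ['\n'] = splitNl l := by
  unfold PySem.Chars.splitOn
  rw [splitOn_go_spec (l.length + 1) l [] [] (by omega)]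
  cases hs : splitNl l with
  | nil => exact absurd hs (splitNl_ne_nil l)
  | cons x xs => simp [splitNl.mapHead]

theorem join_cons_of_ne_nil (sep p : List Char) (q : List (List Char)) (hq : q ≠ []) :
    PySem.Chars.join sep (p :: q) = p ++ sep ++ PySem.Chars.join sep q := by
  cases q with
  | nil => exact absurd rfl hq
  | cons y ys => exact PySem.Chars.join_cons_cons sep p y ys

theorem subGo_eq (shift : Int) : ∀ (n : Nat) (cs : List Char), cs.length ≤ n →
    pvSubGo shift cs = PySem.Chars.join ['\n'] ((splitNl cs).map (pvShiftLine shift)) := by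
  intro n
  induction n with
  | zero =>
    intro cs h
    have hcs : cs = [] := by cases cs <;> simp_all
    subst hcs
    rw [pvSubGo]
    simp [splitNl, PySem.Chars.join_singleton, pvShiftLine, PySem.Chars.startswith]
  | succ n ih =>
    intro cs h
    rw [pvSubGo]
    split
    · rename_i hd
      -- no newline after the first line
      have hdw : cs.dropWhile (· != '\n') = [] := by rw [dw_ne_nl]; exact hd
      rw [splitNl_eq_cons cs, splitNl_tail_nil cs hdw]
      rw [List.map_cons, List.map_nil, PySem.Chars.join_singleton]
      rw [shiftLine_decomp shift cs]
    · rename_i d rs hd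
      have hdw : cs.dropWhile (· != '\n') = d :: rs := by rw [dw_ne_nl]; exact hd
      have hlen : rs.length < cs.length := by
        have h1 : (cs.dropWhile (· == '#')).length ≤ cs.length := List.length_dropWhile_le _ _
        have h2 := List.length_dropWhile_le (· != '\n') (cs.dropWhile (· == '#'))
        rw [hd] at h2
        simp at h2
        omega
      rw [splitNl_eq_cons cs, splitNl_tail_cons cs d rs hdw]
      rw [List.map_cons]
      rw [join_cons_of_ne_nil _ _ _ (by simp [splitNl_ne_nil rs])]
      rw [← ih rs (by omega)]
      rw [shiftLine_decomp shift cs]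
      simp

-- ===== VERDICT (by name: the statement is the Claim_ definition above) =====
theorem shift_heading_levels_spec : Claim_equal_shift_heading_levels := by
  intro m shift _hd
  unfold Spec_shift_heading_levels
  unfold shift_heading_levels shift_heading_levels_alt
  split
  · rfl
  · rw [splitOn_eq_splitNl, subGo_eq shift m.toList.length m.toList (le_refl _)]
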